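-- pv_equiv track=rewrite | github.com/Patxi91/CodeWars_Cloud | 7kyu-Reverse Factorials-Patxi.py | reverse_factorial
-- ===== SOURCE A (Python) =====
-- def reverse_factorial(num):
--     current_num = 1
--     factorial_count = 1
--
--     while current_num < num:
--         factorial_count += 1
--         current_num *= factorial_count
--
--     if current_num == num:
--         return f"{factorial_count}!"
--     else:
--         return "None"
-- ===== SOURCE B (Python) =====
-- def reverse_factorial(num):
--     if num < 1:
--         return "None"
--     i = 1
--     while num > 1:
--         i += 1
--         if num % i != 0:
--             return "None"
--         num //= i
--     return f"{i}!"
-- ===== Notes on version B (the rewrite author's own statement) =====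
-- stated objective: alternative
-- what changed: B factors num downward by successive integers with an early divisibility exit instead of multiplying factorials up until reaching or exceeding num.
import Mathlib
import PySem

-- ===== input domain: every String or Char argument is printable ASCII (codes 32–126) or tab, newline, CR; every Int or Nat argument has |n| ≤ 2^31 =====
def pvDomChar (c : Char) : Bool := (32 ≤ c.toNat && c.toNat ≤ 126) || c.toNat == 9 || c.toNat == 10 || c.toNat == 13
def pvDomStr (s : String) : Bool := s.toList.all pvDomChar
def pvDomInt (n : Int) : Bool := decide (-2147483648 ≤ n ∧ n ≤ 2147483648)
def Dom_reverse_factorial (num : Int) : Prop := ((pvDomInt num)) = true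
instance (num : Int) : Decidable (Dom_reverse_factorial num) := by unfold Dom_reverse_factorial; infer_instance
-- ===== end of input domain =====

-- B factors num downward by successive divisors instead of multiplying factorials upward; alternative algorithm, same results.

-- ===== PORT A =====
-- the while loop of A; cur and fc stay positive integers (cur = current_num, fc = factorial_count)
def loopA (num : Int) (cur fc : Nat) (hc : 1 ≤ cur) (hf : 1 ≤ fc) : String :=
  if h : (cur : Int) < num then
    loopA num (cur * (fc + 1)) (fc + 1) (Nat.one_le_iff_ne_zero.mpr (Nat.mul_ne_zero (by omega) (by omega))) (by omega)
  else
    if (cur : Int) == num then PySem.Int.toStr (fc : Int) ++ "!" else "None"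
termination_by num.toNat - cur
decreasing_by
  have h2 : cur + 1 ≤ cur * (fc + 1) := by nlinarith
  omega

def reverse_factorial (num : Int) : String :=
  loopA num 1 1 (by omega) (by omega)

-- ===== PORT B =====
-- the while loop of B; i stays a positive integer
def loopB (num : Int) (i : Nat) (hi : 1 ≤ i) : String :=
  if h : 1 < num then
    if PySem.Int.mod num ((i : Int) + 1) != 0 then "None"
    else loopB (PySem.Int.floordiv num ((i : Int) + 1)) (i + 1) (by omega)
  else PySem.Int.toStr (i : Int) ++ "!"
termination_by num.toNat
decreasing_by
  have hp : (0:Int) < (i : Int) + 1 := by positivity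
  rw [PySem.Int.floordiv_eq_ediv_of_pos hp]
  have h2 : 0 ≤ num / ((i : Int) + 1) := Int.ediv_nonneg (by omega) (by omega)
  have h3 : num / ((i : Int) + 1) * ((i : Int) + 1) ≤ num := Int.ediv_mul_le num (by omega)
  have hi1 : (1:Int) ≤ (i : Int) := by exact_mod_cast hi
  have h4 : 2 * (num / ((i : Int) + 1)) ≤ num / ((i : Int) + 1) * ((i : Int) + 1) := by nlinarith [hi1]
  omega

def reverse_factorial_alt (num : Int) : String :=
  if num < 1 then "None" else loopB num 1 (by omega)

-- ===== PRECONDITION & SPEC =====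
def Spec_reverse_factorial (num : Int) (out : String) : Prop := out = reverse_factorial_alt num
instance (num : Int) (out : String) : Decidable (Spec_reverse_factorial num out) := by
  unfold Spec_reverse_factorial; infer_instance

-- ===== CLAIM =====
def Claim_equal_reverse_factorial : Prop :=
  ∀ (num : Int), Dom_reverse_factorial num → Spec_reverse_factorial num (reverse_factorial num)

-- ===== LEMMAS AND PROOFS =====

theorem fact_pos (n : Nat) : 1 ≤ n.factorial := Nat.one_le_iff_ne_zero.mpr n.factorial_ne_zero

-- A's loop hits: if num = k! with fc ≤ k, it returns "k!"
theorem loopA_hit (num : Int) (k : Nat) (hnum : (k.factorial : Int) = num) :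
    ∀ fc (hf : 1 ≤ fc) (hfk : fc ≤ k),
      loopA num fc.factorial fc (fact_pos fc) hf = PySem.Int.toStr (k : Int) ++ "!" := by
  suffices H : ∀ n cur fc (hc : 1 ≤ cur) (hf : 1 ≤ fc), cur = fc.factorial → fc ≤ k → k - fc = n →
      loopA num cur fc hc hf = PySem.Int.toStr (k : Int) ++ "!" by
    intro fc hf hfk
    exact H (k - fc) fc.factorial fc (fact_pos fc) hf rfl hfk rfl
  intro n
  induction n with
  | zero =>
    intro cur fc hc hf hcur hfk hn
    have hfe : fc = k := by omega
    subst hfe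
    rw [loopA]
    have hlt : ¬ ((cur : Int) < num) := by rw [← hnum, ← hcur]; omega
    rw [dif_neg hlt]
    have heq : ((cur : Int) == num) = true := by
      simp only [beq_iff_eq]; rw [← hnum, hcur]
    rw [heq]; rfl
  | succ n ih =>
    intro cur fc hc hf hcur hfk hn
    have hlt : fc < k := by omega
    rw [loopA]
    have hflt : fc.factorial < k.factorial := (Nat.factorial_lt (by omega)).mpr hlt
    have hcond : (cur : Int) < num := by
      rw [← hnum, hcur]; exact_mod_cast hflt
    rw [dif_pos hcond]
    exact ih (cur * (fc + 1)) (fc + 1) _ _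
      (by rw [hcur, Nat.factorial_succ]; ring) (by omega) (by omega)

-- A's loop misses: if num is not any factorial (index ≥ 1), it returns "None"
theorem loopA_miss (num : Int) (h : ∀ k : Nat, 1 ≤ k → (k.factorial : Int) ≠ num) :
    ∀ cur fc (hc : 1 ≤ cur) (hf : 1 ≤ fc), cur = fc.factorial →
      loopA num cur fc hc hf = "None" := by
  suffices H : ∀ n cur fc (hc : 1 ≤ cur) (hf : 1 ≤ fc), cur = fc.factorial → num.toNat - cur ≤ n →
      loopA num cur fc hc hf = "None" by
    intro cur fc hc hf hcur
    exact H (num.toNat - cur) cur fc hc hf hcur le_rfl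
  intro n
  induction n with
  | zero =>
    intro cur fc hc hf hcur hn
    rw [loopA]
    have hge : ¬ ((cur : Int) < num) := by omega
    rw [dif_neg hge]
    have hne : ((cur : Int) == num) = false := by
      simp only [beq_eq_false_iff_ne, ne_eq]
      rw [hcur]; exact h fc hf
    rw [hne]; rfl
  | succ n ih =>
    intro cur fc hc hf hcur hn
    rw [loopA]
    by_cases hcond : (cur : Int) < num
    · rw [dif_pos hcond]
      have hgrow : cur + 1 ≤ cur * (fc + 1) := by nlinarith
      exact ih (cur * (fc + 1)) (fc + 1) _ _
        (by rw [hcur, Nat.factorial_succ]; ring) (by omega)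
    · rw [dif_neg hcond]
      have hne : ((cur : Int) == num) = false := by
        simp only [beq_eq_false_iff_ne, ne_eq]
        rw [hcur]; exact h fc hf
      rw [hne]; rfl

-- B's loop hits: if num * i! = k! with i ≤ k, it returns "k!"
theorem loopB_hit (k : Nat) :
    ∀ (num : Int) (i : Nat), 1 ≤ num → 1 ≤ i → i ≤ k →
      num * (i.factorial : Int) = (k.factorial : Int) →
      ∀ hi, loopB num i hi = PySem.Int.toStr (k : Int) ++ "!" := by
  suffices H : ∀ n (num : Int) (i : Nat), 1 ≤ num → 1 ≤ i → i ≤ k →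
      num * (i.factorial : Int) = (k.factorial : Int) → k - i = n →
      ∀ hi, loopB num i hi = PySem.Int.toStr (k : Int) ++ "!" by
    intro num i h1 h2 h3 h4 hi
    exact H (k - i) num i h1 h2 h3 h4 rfl hi
  intro n
  induction n with
  | zero =>
    intro num i h1 h2 h3 h4 hn hi
    have hik : i = k := by omega
    subst hik
    have hone : num = 1 := by
      have hfp : (0:Int) < (i.factorial : Int) := by exact_mod_cast i.factorial_pos
      nlinarith
    subst hone
    rw [loopB]
    rw [dif_neg (by omega)]
  | succ n ih =>
    intro num i h1 h2 h3 h4 hn hi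
    have hik : i < k := by omega
    -- num ≥ 2
    have h2n : 2 ≤ num := by
      rcases lt_or_ge num 2 with hl | hg
      · exfalso
        have hone : num = 1 := by omega
        subst hone
        have : (i.factorial : Int) < (k.factorial : Int) := by
          exact_mod_cast (Nat.factorial_lt (by omega)).mpr hik
        omega
      · exact hg
    set m : Nat := num.toNat with hm
    have hnum : num = (m : Int) := by omega
    have hmfact : m * i.factorial = k.factorial := by
      have := h4
      rw [hnum] at this
      exact_mod_cast this
    obtain ⟨c, hc⟩ := Nat.factorial_dvd_factorial (show i + 1 ≤ k by omega)
    have hmc : m = (i + 1) * c := by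
      have h5 : m * i.factorial = (i + 1) * c * i.factorial := by
        rw [hmfact, hc, Nat.factorial_succ]; ring
      exact Nat.eq_of_mul_eq_mul_right i.factorial_pos h5
    have hcpos : 1 ≤ c := by
      rcases Nat.eq_zero_or_pos c with h0 | hp
      · exfalso; rw [h0, Nat.mul_zero] at hmc; omega
      · exact hp
    rw [loopB]
    rw [dif_pos (by omega)]
    have hmod : PySem.Int.mod num ((i : Int) + 1) = 0 := by
      rw [hnum]
      have : ((i : Int) + 1) = (((i + 1 : Nat)) : Int) := by push_cast; ring
      rw [this, PySem.Int.mod_natCast]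
      have : m % (i + 1) = 0 := by rw [hmc]; exact Nat.mul_mod_right _ _
      rw [this]; rfl
    rw [hmod]
    simp only [bne_self_eq_false, Bool.false_eq_true, if_false]
    have hdiv : PySem.Int.floordiv num ((i : Int) + 1) = (c : Int) := by
      rw [hnum]
      have h6 : ((i : Int) + 1) = (((i + 1 : Nat)) : Int) := by push_cast; ring
      rw [h6, PySem.Int.floordiv_natCast]
      have : m / (i + 1) = c := by rw [hmc]; exact Nat.mul_div_cancel_left c (by omega)
      rw [this]
    rw [hdiv] at *
    exact ih (c : Int) (i + 1) (by exact_mod_cast hcpos) (by omega) (by omega)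
      (by rw [hc]; push_cast; ring) (by omega) _

-- B's loop misses: if num * i! is no factorial with index ≥ i, it returns "None"
theorem loopB_miss :
    ∀ (num : Int) (i : Nat), 1 ≤ num → 1 ≤ i →
      (∀ k : Nat, i ≤ k → num * (i.factorial : Int) ≠ (k.factorial : Int)) →
      ∀ hi, loopB num i hi = "None" := by
  suffices H : ∀ n (num : Int) (i : Nat), num.toNat ≤ n → 1 ≤ num → 1 ≤ i →
      (∀ k : Nat, i ≤ k → num * (i.factorial : Int) ≠ (k.factorial : Int)) →
      ∀ hi, loopB num i hi = "None" by
    intro num i h1 h2 h3 hi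
    exact H num.toNat num i le_rfl h1 h2 h3 hi
  intro n
  induction n with
  | zero =>
    intro num i hle h1 h2 h3 hi
    exfalso; omega
  | succ n ih =>
    intro num i hle h1 h2 h3 hi
    have h2n : 2 ≤ num := by
      rcases lt_or_ge num 2 with hl | hg
      · exfalso
        have hone : num = 1 := by omega
        exact h3 i le_rfl (by rw [hone]; ring)
      · exact hg
    set m : Nat := num.toNat with hm
    have hnum : num = (m : Int) := by omega
    rw [loopB]
    rw [dif_pos (by omega)]
    by_cases hmod : m % (i + 1) = 0
    · -- divisible: recurse
      obtain ⟨c, hmc⟩ : ∃ c, m = (i + 1) * c :=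
        ⟨m / (i + 1), by
          rw [Nat.mul_comm]
          exact (Nat.div_mul_cancel (Nat.dvd_of_mod_eq_zero hmod)).symm⟩
      have hdivnat : m / (i + 1) = c := by
        rw [hmc]; exact Nat.mul_div_cancel_left c (by omega)
      have hmodz : PySem.Int.mod num ((i : Int) + 1) = 0 := by
        rw [hnum]
        have h6 : ((i : Int) + 1) = (((i + 1 : Nat)) : Int) := by push_cast; ring
        rw [h6, PySem.Int.mod_natCast, hmod]; rfl
      rw [hmodz]
      simp only [bne_self_eq_false, Bool.false_eq_true, if_false]
      have hdiv : PySem.Int.floordiv num ((i : Int) + 1) = (c : Int) := by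
        rw [hnum]
        have h6 : ((i : Int) + 1) = (((i + 1 : Nat)) : Int) := by push_cast; ring
        rw [h6, PySem.Int.floordiv_natCast, hdivnat]
      rw [hdiv]
      have hcpos : 1 ≤ c := by
        rcases Nat.eq_zero_or_pos c with h0 | hp
        · exfalso; rw [h0, Nat.mul_zero] at hmc; omega
        · exact hp
      have hclt : c < m := by
        have := Nat.div_lt_self (show 0 < m by omega) (show 1 < i + 1 by omega)
        omega
      refine ih (c : Int) (i + 1) (by simp only [Int.toNat_natCast]; omega)
        (by exact_mod_cast hcpos) (by omega) ?_ _
      intro k hk hne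
      refine h3 k (by omega) ?_
      have heq : num * (i.factorial : Int) = (c : Int) * ((i + 1).factorial : Int) := by
        rw [hnum]
        have h7 : (m : Int) = ((i : Int) + 1) * (c : Int) := by exact_mod_cast hmc
        rw [h7, Nat.factorial_succ]; push_cast; ring
      rw [heq]; exact hne
    · -- not divisible: return "None"
      have hmodnz : (PySem.Int.mod num ((i : Int) + 1) != 0) = true := by
        rw [hnum]
        have h6 : ((i : Int) + 1) = (((i + 1 : Nat)) : Int) := by push_cast; ring
        rw [h6, PySem.Int.mod_natCast]
        simp only [bne_iff_ne, ne_eq]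
        exact_mod_cast hmod
      rw [hmodnz]
      rfl

-- ===== VERDICT =====
theorem reverse_factorial_spec : Claim_equal_reverse_factorial := by
  intro num _
  unfold Spec_reverse_factorial reverse_factorial reverse_factorial_alt
  by_cases hlt : num < 1
  · -- A: cur = 1 is never < num and never = num, so "None"
    rw [if_pos hlt]
    rw [loopA]
    simp only [Nat.cast_one]
    rw [dif_neg (by omega)]
    have : ((1:Int) == num) = false := by simp; omega
    rw [this]; rfl
  · rw [if_neg hlt]
    by_cases hex : ∃ k : Nat, 1 ≤ k ∧ (k.factorial : Int) = num
    · obtain ⟨k, hk1, hk⟩ := hex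
      have hA := loopA_hit num k hk 1 (by omega) hk1
      have hB := loopB_hit k num 1 (by omega) (by omega) hk1 (by simpa using hk.symm) (by omega)
      simpa [Nat.factorial] using hA.trans hB.symm
    · rw [not_exists] at hex
      have hex' : ∀ k : Nat, 1 ≤ k → (k.factorial : Int) ≠ num := by
        intro k hk hne; exact hex k ⟨hk, hne⟩
      have hA := loopA_miss num (fun k hk => hex' k hk) 1 1 (by omega) (by omega) (by simp [Nat.factorial])
      have hB := loopB_miss num 1 (by omega) (by omega) (fun k hk hne => hex k ⟨Nat.le_trans (by omega) hk, by simpa using hne.symm⟩) (by omega)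
      rw [hA, hB]
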